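-- pv_equiv track=rewrite | github.com/vKrypto/practice-dsa | self_practice/gfg/graph/test2.py | uniquePositions
-- ===== SOURCE A (Python) =====
-- def uniquePositions(moves : str, k : int) -> int:
--     # code here
--     positions = set()
--     positions.add(0)
--     position = 0
--
--     for move in moves:
--         if move == 'F':
--             position += 2
--         else:
--             position -= 2
--         if position not in positions:
--             positions.add(position)
--
--
--     return len(positions)
-- ===== SOURCE B (Python) =====
-- def uniquePositions(moves: str, k: int) -> int:
--     # positions move by exactly +-2, so visited positions are the contiguous
--     # even block between the trajectory's extremes: count = (hi-lo)//2 + 1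
--     position = 0
--     lo = 0
--     hi = 0
--     for move in moves:
--         if move == 'F':
--             position += 2
--         else:
--             position -= 2
--         lo = min(lo, position)
--         hi = max(hi, position)
--     return (hi - lo) // 2 + 1
-- ===== Notes on version B (the rewrite author's own statement) =====
-- stated objective: simpler
-- what changed: Replaces the visited-position set with a single pass tracking the trajectory's min and max, returning the closed-form count (hi-lo)//2+1 of the contiguous even block.
import Mathlib
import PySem

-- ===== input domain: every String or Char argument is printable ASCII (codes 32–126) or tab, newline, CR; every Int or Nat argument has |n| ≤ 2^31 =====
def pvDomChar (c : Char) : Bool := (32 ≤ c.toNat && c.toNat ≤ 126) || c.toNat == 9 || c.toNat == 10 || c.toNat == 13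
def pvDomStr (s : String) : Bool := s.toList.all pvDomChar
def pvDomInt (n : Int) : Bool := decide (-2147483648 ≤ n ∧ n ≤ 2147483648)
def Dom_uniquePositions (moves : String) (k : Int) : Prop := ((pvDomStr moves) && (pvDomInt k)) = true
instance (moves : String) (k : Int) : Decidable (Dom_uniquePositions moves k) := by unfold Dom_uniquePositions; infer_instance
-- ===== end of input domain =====

-- B replaces A's visited-position set with a one-pass min/max of the trajectory
-- and the closed-form count (hi-lo)//2+1 (simpler: O(1) extra space).


-- ===== PORT A =====
-- one loop iteration of A: update position, then add it to the set if absent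
def upStepA (st : PySem.Set Int × Int) (move : Char) : PySem.Set Int × Int :=
  let position := if move == 'F' then st.2 + 2 else st.2 - 2
  let positions := if PySem.Set.contains st.1 position then st.1
                   else PySem.Set.add st.1 position
  (positions, position)

def uniquePositions (moves : String) (k : Int) : Int :=
  let init : PySem.Set Int × Int := (PySem.Set.add PySem.Set.empty 0, 0)
  let res := moves.toList.foldl upStepA init
  PySem.Set.len res.1

-- ===== PORT B =====
-- one loop iteration of B: update position, track running min and max
def upStepB (st : Int × Int × Int) (move : Char) : Int × Int × Int :=
  let p := if move == 'F' then st.1 + 2 else st.1 - 2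
  (p, min st.2.1 p, max st.2.2 p)

def uniquePositions_alt (moves : String) (k : Int) : Int :=
  let res := moves.toList.foldl upStepB (0, 0, 0)
  PySem.Int.floordiv (res.2.2 - res.2.1) 2 + 1

-- ===== PRECONDITION & SPEC =====
def Spec_uniquePositions (moves : String) (k : Int) (out : Int) : Prop := out = uniquePositions_alt moves k
instance (moves : String) (k : Int) (out : Int) : Decidable (Spec_uniquePositions moves k out) := by unfold Spec_uniquePositions; infer_instance

-- ===== CLAIM (what is proved, stated in full; the proofs are below) =====
def Claim_equal_uniquePositions : Prop := ∀ (moves : String) (k : Int), Dom_uniquePositions moves k → Spec_uniquePositions moves k (uniquePositions moves k)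

-- ===== LEMMAS AND PROOFS =====

-- loop invariant: the set is exactly the even integers of [lo, hi], of the
-- predicted cardinality, and p lies inside
def upInv (S : List Int) (p lo hi : Int) : Prop :=
  2 ∣ p ∧ 2 ∣ lo ∧ 2 ∣ hi ∧ lo ≤ p ∧ p ≤ hi ∧
  (∀ x : Int, x ∈ S ↔ 2 ∣ x ∧ lo ≤ x ∧ x ≤ hi) ∧
  hi - lo = 2 * ((S.length : Int) - 1)

lemma upInv_init : upInv [0] 0 0 0 := by
  refine ⟨⟨0, rfl⟩, ⟨0, rfl⟩, ⟨0, rfl⟩, le_refl _, le_refl _, ?_, by simp⟩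
  intro x
  simp only [List.mem_singleton]
  constructor
  · rintro rfl; exact ⟨⟨0, rfl⟩, le_refl _, le_refl _⟩
  · rintro ⟨_, h1, h2⟩; omega

lemma upInv_step (S : List Int) (p lo hi : Int) (c : Char) (h : upInv S p lo hi) :
    ∃ S' p' lo' hi',
      upStepA (S, p) c = (S', p') ∧ upStepB (p, lo, hi) c = (p', lo', hi') ∧
      upInv S' p' lo' hi' := by
  obtain ⟨hp2, hlo2, hhi2, hlop, hphi, hmem, hlen⟩ := h
  by_cases hc : (c == 'F') = true
  · -- p' = p + 2
    by_cases hin : p + 2 ≤ hi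
    · refine ⟨S, p + 2, lo, hi, ?_, ?_, ?_⟩
      · have hmemS : p + 2 ∈ S := (hmem _).mpr ⟨by omega, by omega, hin⟩
        simp [upStepA, hc, PySem.Set.contains, hmemS]
      · have h1 : min lo (p + 2) = lo := min_eq_left (by omega)
        have h2 : max hi (p + 2) = hi := max_eq_left (by omega)
        simp [upStepB, hc, h1, h2]
      · exact ⟨by omega, hlo2, hhi2, by omega, hin, hmem, hlen⟩
    · -- p = hi (both even, p ≤ hi < p+2), so new position hi + 2
      have hph : p = hi := by omega
      refine ⟨S ++ [p + 2], p + 2, lo, p + 2, ?_, ?_, ?_⟩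
      · have hnot : p + 2 ∉ S := fun h' => hin ((hmem _).mp h').2.2
        simp [upStepA, hc, PySem.Set.add, PySem.Set.contains, hnot]
      · have h1 : min lo (p + 2) = lo := min_eq_left (by omega)
        have h2 : max hi (p + 2) = p + 2 := max_eq_right (by omega)
        simp [upStepB, hc, h1, h2]
      · refine ⟨by omega, hlo2, by omega, by omega, le_refl _, ?_, ?_⟩
        · intro x
          simp only [List.mem_append, List.mem_singleton, hmem]
          constructor
          · rintro (⟨hx2, h1, h2⟩ | rfl)
            · exact ⟨hx2, h1, by omega⟩
            · exact ⟨by omega, by omega, le_refl _⟩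
          · rintro ⟨hx2, h1, h2⟩
            by_cases hle : x ≤ hi
            · exact Or.inl ⟨hx2, h1, hle⟩
            · right; omega
        · simp only [List.length_append, List.length_singleton]
          push_cast; omega
  · -- p' = p - 2, symmetric
    by_cases hin : lo ≤ p - 2
    · refine ⟨S, p - 2, lo, hi, ?_, ?_, ?_⟩
      · have hmemS : p - 2 ∈ S := (hmem _).mpr ⟨by omega, hin, by omega⟩
        simp [upStepA, hc, PySem.Set.contains, hmemS]
      · have h1 : min lo (p - 2) = lo := min_eq_left hin
        have h2 : max hi (p - 2) = hi := max_eq_left (by omega)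
        simp [upStepB, hc, h1, h2]
      · exact ⟨by omega, hlo2, hhi2, hin, by omega, hmem, hlen⟩
    · have hpl : p = lo := by omega
      refine ⟨S ++ [p - 2], p - 2, p - 2, hi, ?_, ?_, ?_⟩
      · have hnot : p - 2 ∉ S := fun h' => hin ((hmem _).mp h').2.1
        simp [upStepA, hc, PySem.Set.add, PySem.Set.contains, hnot]
      · have h1 : min lo (p - 2) = p - 2 := min_eq_right (by omega)
        have h2 : max hi (p - 2) = hi := max_eq_left (by omega)
        simp [upStepB, hc, h1, h2]
      · refine ⟨by omega, by omega, hhi2, le_refl _, by omega, ?_, ?_⟩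
        · intro x
          simp only [List.mem_append, List.mem_singleton, hmem]
          constructor
          · rintro (⟨hx2, h1, h2⟩ | rfl)
            · exact ⟨hx2, by omega, h2⟩
            · exact ⟨by omega, le_refl _, by omega⟩
          · rintro ⟨hx2, h1, h2⟩
            by_cases hge : lo ≤ x
            · exact Or.inl ⟨hx2, hge, h2⟩
            · right; omega
        · simp only [List.length_append, List.length_singleton]
          push_cast; omega

lemma upInv_fold (l : List Char) :
    ∀ (S : List Int) (p lo hi : Int), upInv S p lo hi →
    ∃ S' p' lo' hi',
      l.foldl upStepA (S, p) = (S', p') ∧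
      l.foldl upStepB (p, lo, hi) = (p', lo', hi') ∧
      upInv S' p' lo' hi' := by
  induction l with
  | nil => intro S p lo hi h; exact ⟨S, p, lo, hi, rfl, rfl, h⟩
  | cons c cs ih =>
    intro S p lo hi h
    obtain ⟨S1, p1, lo1, hi1, hA, hB, h1⟩ := upInv_step S p lo hi c h
    obtain ⟨S', p', lo', hi', hA', hB', h'⟩ := ih S1 p1 lo1 hi1 h1
    exact ⟨S', p', lo', hi', by simp [List.foldl_cons, hA, hA'],
           by simp [List.foldl_cons, hB, hB'], h'⟩

-- ===== VERDICT (by name: the statement is the Claim_ definition above) =====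
theorem uniquePositions_spec : Claim_equal_uniquePositions := by
  intro moves k _
  unfold Spec_uniquePositions uniquePositions uniquePositions_alt
  obtain ⟨S', p', lo', hi', hA, hB, hinv⟩ :=
    upInv_fold moves.toList [0] 0 0 0 upInv_init
  have hstart : (PySem.Set.add PySem.Set.empty 0 : PySem.Set Int) = [0] := rfl
  simp only [hstart, hA, hB]
  obtain ⟨_, _, _, hlop, hphi, _, hlen⟩ := hinv
  have hlen1 : 1 ≤ (S'.length : Int) := by omega
  rw [hlen]
  have h2 : PySem.Int.floordiv (2 * ((S'.length : Int) - 1)) 2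
      = (S'.length : Int) - 1 := by
    simp [PySem.Int.floordiv, Int.mul_fdiv_cancel_left _ (by norm_num : (2:Int) ≠ 0)]
  rw [h2]
  simp [PySem.Set.len]
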